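-- pv_equiv track=rewrite | github.com/OmarAlmighty/Introduction-to-Programming-Using-Python-Liang-1st-edtion | CH11/EX11.20.py | isConsecutiveFour
-- ===== SOURCE A (Python) =====
-- def isConsecutiveFour(values):
--     numberOfRows = len(values)
--     numberOfColumns = len(values[0])
--
--     # Check rows
--     for i in range(numberOfRows):
--         if isConsecutiveFourInList(values[i]):
--             return True
--
--     # Check columns
--     for j in range(numberOfColumns):
--         column = numberOfRows * [' ']
--
--         # Get a column into an array
--         for i in range(numberOfRows):
--             column[i] = values[i][j]
--
--         if isConsecutiveFourInList(column):
--             return True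
--
--     # Check major diagonal (lower part)
--     for i in range(numberOfRows - 3):
--         numberOfElementsInDiagonal = min(numberOfRows - i, numberOfColumns)
--         diagonal = numberOfElementsInDiagonal * [' ']
--         for k in range(numberOfElementsInDiagonal):
--             diagonal[k] = values[k + i][k]
--
--         if isConsecutiveFourInList(diagonal):
--             return True
--
--     # Check major diagonal (upper part)
--     for j in range(1, numberOfColumns - 3):
--         numberOfElementsInDiagonal = min(numberOfColumns - j, numberOfRows)
--         diagonal = numberOfElementsInDiagonal * [' ']
--         for k in range(numberOfElementsInDiagonal):
--             diagonal[k] = values[k][k + j]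
--
--         if isConsecutiveFourInList(diagonal):
--             return True
--
--     # Check sub-diagonal (left part)
--     for j in range(3, numberOfColumns):
--         numberOfElementsInDiagonal = min(j + 1, numberOfRows)
--         diagonal = numberOfElementsInDiagonal * [' ']
--
--         for k in range(numberOfElementsInDiagonal):
--             diagonal[k] = values[k][j - k]
--
--         if isConsecutiveFourInList(diagonal):
--             return True
--
--     # Check sub-diagonal (right part)
--     for i in range(1, numberOfRows - 3):
--         numberOfElementsInDiagonal = min(numberOfRows - i, numberOfColumns)
--         diagonal = numberOfElementsInDiagonal * [' ']
--
--         for k in range(numberOfElementsInDiagonal):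
--             diagonal[k] = values[k + i][numberOfColumns - k - 1]
--
--         if isConsecutiveFourInList(diagonal):
--             return True
--
--     return False
--
-- def isConsecutiveFourInList(values):
--     for i in range(len(values) - 3):
--         isEqual = True
--         for j in range(i, i + 3):
--             if values[j] == '\u0000' or values[j] != values[j + 1]:
--                 isEqual = False
--                 break
--
--         if isEqual: return True
--
--     return False
-- ===== SOURCE B (Python) =====
-- def isConsecutiveFour(values):
--     numberOfRows = len(values)
--     numberOfColumns = len(values[0])
--
--     # Horizontal runs: scan each row directly.
--     for row in values:
--         for c in range(len(row) - 3):
--             v = row[c]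
--             if v != '\u0000' and row[c + 1] == v == row[c + 2] == row[c + 3]:
--                 return True
--
--     # Vertical and both diagonal runs: one cell-major scan over start cells.
--     for i in range(numberOfRows - 3):
--         for j in range(numberOfColumns):
--             v = values[i][j]
--             if v == '\u0000':
--                 continue
--             if values[i + 1][j] == v == values[i + 2][j] == values[i + 3][j]:
--                 return True
--             if j + 3 < numberOfColumns and \
--                     values[i + 1][j + 1] == v == values[i + 2][j + 2] == values[i + 3][j + 3]:
--                 return True
--             if j >= 3 and \
--                     values[i + 1][j - 1] == v == values[i + 2][j - 2] == values[i + 3][j - 3]: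
--                 return True
--     return False
-- ===== Notes on version B (the rewrite author's own statement) =====
-- stated objective: simpler
-- what changed: Replaces A's six per-line passes (rows, extracted column lists, four families of extracted diagonal lists, each rescanned by a windowed helper) with a direct scan: horizontal windows per row, then one cell-major pass checking the vertical, down-right and down-left run starting at each cell.
import Mathlib
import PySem

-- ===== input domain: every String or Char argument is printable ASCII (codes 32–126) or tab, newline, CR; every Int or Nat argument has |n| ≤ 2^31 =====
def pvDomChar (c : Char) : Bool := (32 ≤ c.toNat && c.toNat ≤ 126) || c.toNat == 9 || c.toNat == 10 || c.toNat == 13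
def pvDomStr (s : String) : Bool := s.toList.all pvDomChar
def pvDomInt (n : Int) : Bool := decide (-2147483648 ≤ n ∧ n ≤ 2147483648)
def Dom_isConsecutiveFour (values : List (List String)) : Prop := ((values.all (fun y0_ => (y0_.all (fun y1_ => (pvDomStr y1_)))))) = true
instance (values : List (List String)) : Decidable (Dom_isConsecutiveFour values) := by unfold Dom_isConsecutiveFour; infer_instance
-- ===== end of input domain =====

-- B replaces A's per-line list extraction + windowed helper with a single direct
-- cell-major scan over run start cells; objective: simpler (same asymptotic cost).


-- ===== PORT A =====
-- helper isConsecutiveFourInList; list indexing is in range wherever Python's is,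
-- so `getD` with a default is exact there
def c4list (l : List String) : Bool :=
  (List.range (l.length - 3)).any fun i =>
    (List.range' i 3).all fun j =>
      !(l.getD j " " == "\u0000") && (l.getD j " " == l.getD (j + 1) " ")

def isConsecutiveFour (values : List (List String)) : Bool :=
  let nR := values.length
  let nC := (values.getD 0 []).length
  ((List.range nR).any fun i => c4list (values.getD i [])) ||
  ((List.range nC).any fun j =>
      c4list ((List.range nR).map fun i => (values.getD i []).getD j " ")) ||
  ((List.range (nR - 3)).any fun i =>
      c4list ((List.range (min (nR - i) nC)).map fun k => (values.getD (k + i) []).getD k " ")) ||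
  ((List.range' 1 (nC - 3 - 1)).any fun j =>
      c4list ((List.range (min (nC - j) nR)).map fun k => (values.getD k []).getD (k + j) " ")) ||
  ((List.range' 3 (nC - 3)).any fun j =>
      c4list ((List.range (min (j + 1) nR)).map fun k => (values.getD k []).getD (j - k) " ")) ||
  ((List.range' 1 (nR - 3 - 1)).any fun i =>
      c4list ((List.range (min (nR - i) nC)).map fun k => (values.getD (k + i) []).getD (nC - k - 1) " "))

-- ===== PORT B =====
def isConsecutiveFour_alt (values : List (List String)) : Bool :=
  let nR := values.length
  let nC := (values.getD 0 []).length
  (values.any fun row =>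
    (List.range (row.length - 3)).any fun c =>
      let v := row.getD c " "
      !(v == "\u0000") &&
        (row.getD (c + 1) " " == v && v == row.getD (c + 2) " " &&
         row.getD (c + 2) " " == row.getD (c + 3) " ")) ||
  ((List.range (nR - 3)).any fun i =>
    (List.range nC).any fun j =>
      let v := (values.getD i []).getD j " "
      !(v == "\u0000") &&
        (((values.getD (i + 1) []).getD j " " == v &&
          v == (values.getD (i + 2) []).getD j " " &&
          (values.getD (i + 2) []).getD j " " == (values.getD (i + 3) []).getD j " ") ||
         (decide (j + 3 < nC) &&
          ((values.getD (i + 1) []).getD (j + 1) " " == v &&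
           v == (values.getD (i + 2) []).getD (j + 2) " " &&
           (values.getD (i + 2) []).getD (j + 2) " " == (values.getD (i + 3) []).getD (j + 3) " ")) ||
         (decide (3 ≤ j) &&
          ((values.getD (i + 1) []).getD (j - 1) " " == v &&
           v == (values.getD (i + 2) []).getD (j - 2) " " &&
           (values.getD (i + 2) []).getD (j - 2) " " == (values.getD (i + 3) []).getD (j - 3) " "))))

-- ===== PRECONDITION & SPEC =====
-- Pre_ excludes exactly the inputs where Python A raises IndexError:
-- the empty grid (values[0]) and grids with a row shorter than row 0
-- (column/diagonal extraction indexes every row at columns < len(values[0])).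
def Pre_isConsecutiveFour (values : List (List String)) : Prop :=
  values ≠ [] ∧ ∀ row ∈ values, (values.getD 0 []).length ≤ row.length
instance (values : List (List String)) : Decidable (Pre_isConsecutiveFour values) := by
  unfold Pre_isConsecutiveFour; infer_instance
def pvWitness_isConsecutiveFour : List (List String) := [["a", "b"], ["b", "a"]]

def Spec_isConsecutiveFour (values : List (List String)) (out : Bool) : Prop := out = isConsecutiveFour_alt values
instance (values : List (List String)) (out : Bool) : Decidable (Spec_isConsecutiveFour values out) := by unfold Spec_isConsecutiveFour; infer_instance

-- ===== CLAIM (what is proved, stated in full; the proofs are below) =====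
def Claim_equal_isConsecutiveFour : Prop := ∀ (values : List (List String)), Dom_isConsecutiveFour values → Pre_isConsecutiveFour values → Spec_isConsecutiveFour values (isConsecutiveFour values)

-- ===== LEMMAS AND PROOFS =====

-- the value of cell (r, c)
def vA (values : List (List String)) (r c : Nat) : String := (values.getD r []).getD c " "

-- four equal non-null values, in B's association order
def E4 (a b c d : String) : Prop := a ≠ "\u0000" ∧ b = a ∧ a = c ∧ c = d

def W4 (l : List String) (i : Nat) : Prop :=
  E4 (l.getD i " ") (l.getD (i + 1) " ") (l.getD (i + 2) " ") (l.getD (i + 3) " ")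

-- a horizontal run of four somewhere in row i (row's own length, as both programs scan it)
def Hrun (values : List (List String)) : Prop :=
  ∃ i c, i < values.length ∧ c + 4 ≤ (values.getD i []).length ∧ W4 (values.getD i []) c

-- a vertical run of four starting at (r, c)
def Vrun (values : List (List String)) : Prop :=
  ∃ r c, r + 4 ≤ values.length ∧ c < (values.getD 0 []).length ∧
    E4 (vA values r c) (vA values (r + 1) c) (vA values (r + 2) c) (vA values (r + 3) c)

-- a down-right diagonal run of four starting at (r, c)
def Drun (values : List (List String)) : Prop :=
  ∃ r c, r + 4 ≤ values.length ∧ c + 4 ≤ (values.getD 0 []).length ∧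
    E4 (vA values r c) (vA values (r + 1) (c + 1)) (vA values (r + 2) (c + 2)) (vA values (r + 3) (c + 3))

-- a down-left diagonal run of four starting at (r, c)
def Arun (values : List (List String)) : Prop :=
  ∃ r c, r + 4 ≤ values.length ∧ 3 ≤ c ∧ c < (values.getD 0 []).length ∧
    E4 (vA values r c) (vA values (r + 1) (c - 1)) (vA values (r + 2) (c - 2)) (vA values (r + 3) (c - 3))

theorem c4list_iff (l : List String) :
    c4list l = true ↔ ∃ i, i + 4 ≤ l.length ∧ W4 l i := by
  unfold c4list
  simp only [List.any_eq_true, List.mem_range, List.range', List.all_cons, List.all_nil,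
    Bool.and_eq_true, Bool.and_true, beq_iff_eq, Bool.not_eq_true', beq_eq_false_iff_ne]
  constructor
  · rintro ⟨i, hi, ⟨h1n, h1⟩, ⟨h2n, h2⟩, h3n, h3⟩
    exact ⟨i, by omega, h1n, h1.symm, h1.trans h2, h3⟩
  · rintro ⟨i, hi, hn, hb, hc, hd⟩
    refine ⟨i, by omega, ⟨hn, hb.symm⟩, ⟨?_, ?_⟩, ?_, ?_⟩
    · rwa [hb]
    · rw [hb]; exact hc
    · rw [← hc]; exact hn
    · exact hd

theorem getD_map_range {n k : Nat} (f : Nat → String) (h : k < n) :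
    ((List.range n).map f).getD k " " = f k := by
  simp [List.getD_eq_getElem?_getD, h]

theorem c4map_iff (n : Nat) (f : Nat → String) :
    c4list ((List.range n).map f) = true ↔
      ∃ k, k + 4 ≤ n ∧ E4 (f k) (f (k + 1)) (f (k + 2)) (f (k + 3)) := by
  rw [c4list_iff]
  simp only [List.length_map, List.length_range]
  constructor
  · rintro ⟨k, hk, hw⟩
    refine ⟨k, hk, ?_⟩
    unfold W4 at hw
    rwa [getD_map_range f (by omega), getD_map_range f (by omega),
      getD_map_range f (by omega), getD_map_range f (by omega)] at hw
  · rintro ⟨k, hk, he⟩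
    refine ⟨k, hk, ?_⟩
    unfold W4
    rwa [getD_map_range f (by omega), getD_map_range f (by omega),
      getD_map_range f (by omega), getD_map_range f (by omega)]

theorem altB_iff (values : List (List String)) :
    isConsecutiveFour_alt values = true ↔
      Hrun values ∨ Vrun values ∨ Drun values ∨ Arun values := by
  unfold isConsecutiveFour_alt
  simp only [Bool.or_eq_true, Bool.and_eq_true, List.any_eq_true, List.mem_range,
    beq_iff_eq, Bool.not_eq_true', beq_eq_false_iff_ne, decide_eq_true_eq]
  unfold Hrun Vrun Drun Arun W4 E4 vA
  constructor
  · rintro (⟨row, hrow, c, hc, hne, ⟨h1, h2⟩, h3⟩ | ⟨i, hi, j, hj, hne, hcase⟩)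
    · obtain ⟨k, hk, hkeq⟩ := List.mem_iff_getElem.mp hrow
      have hrw : values.getD k [] = row := by rw [List.getD_eq_getElem values [] hk, hkeq]
      exact Or.inl ⟨k, c, hk, by rw [hrw]; omega, by rw [hrw]; exact ⟨hne, h1, h2, h3⟩⟩
    · rcases hcase with (⟨⟨h1, h2⟩, h3⟩ | ⟨hb, ⟨h1, h2⟩, h3⟩) | ⟨hb, ⟨h1, h2⟩, h3⟩
      · exact Or.inr (Or.inl ⟨i, j, by omega, hj, hne, h1, h2, h3⟩)
      · exact Or.inr (Or.inr (Or.inl ⟨i, j, by omega, by omega, hne, h1, h2, h3⟩))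
      · exact Or.inr (Or.inr (Or.inr ⟨i, j, by omega, hb, hj, hne, h1, h2, h3⟩))
  · rintro (⟨i, c, hi, hc, hne, h1, h2, h3⟩ | ⟨r, c, hr, hc, hne, h1, h2, h3⟩ |
      ⟨r, c, hr, hc, hne, h1, h2, h3⟩ | ⟨r, c, hr, hc3, hc, hne, h1, h2, h3⟩)
    · refine Or.inl ⟨values.getD i [], ?_, c, by omega, hne, ⟨h1, h2⟩, h3⟩
      rw [List.getD_eq_getElem values [] hi]; exact List.getElem_mem hi
    · exact Or.inr ⟨r, by omega, c, hc, hne, Or.inl (Or.inl ⟨⟨h1, h2⟩, h3⟩)⟩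
    · exact Or.inr ⟨r, by omega, c, by omega, hne, Or.inl (Or.inr ⟨by omega, ⟨h1, h2⟩, h3⟩)⟩
    · exact Or.inr ⟨r, by omega, c, hc, hne, Or.inr ⟨hc3, ⟨h1, h2⟩, h3⟩⟩

theorem E4_congr {a b c d a' b' c' d' : String} (ha : a = a') (hb : b = b')
    (hc : c = c') (hd : d = d') : E4 a b c d → E4 a' b' c' d' := by
  intro h; subst ha; subst hb; subst hc; subst hd; exact h

theorem cell_congr (values : List (List String)) {r r' c c' : Nat} (hr : r = r') (hc : c = c') :
    (values.getD r []).getD c " " = (values.getD r' []).getD c' " " := by rw [hr, hc]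

theorem portA_iff (values : List (List String)) :
    isConsecutiveFour values = true ↔
      Hrun values ∨ Vrun values ∨ Drun values ∨ Arun values := by
  unfold isConsecutiveFour
  simp only [Bool.or_eq_true, List.any_eq_true, List.mem_range, List.mem_range'_1,
    c4map_iff]
  simp only [c4list_iff]
  unfold Hrun Vrun Drun Arun vA
  constructor
  · rintro (((((⟨i, hi, c, hc, hw⟩ | ⟨j, hj, k, hk, he⟩) | ⟨x, hx, k, hk, he⟩) |
      ⟨x, ⟨hx1, hx2⟩, k, hk, he⟩) | ⟨x, ⟨hx1, hx2⟩, k, hk, he⟩) | ⟨x, ⟨hx1, hx2⟩, k, hk, he⟩)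
    · exact Or.inl ⟨i, c, hi, hc, hw⟩
    · exact Or.inr (Or.inl ⟨k, j, hk, hj, he⟩)
    · exact Or.inr (Or.inr (Or.inl ⟨k + x, k, by omega, by omega,
        E4_congr (cell_congr values rfl rfl) (cell_congr values (by omega) rfl)
          (cell_congr values (by omega) rfl) (cell_congr values (by omega) rfl) he⟩))
    · exact Or.inr (Or.inr (Or.inl ⟨k, k + x, by omega, by omega,
        E4_congr (cell_congr values rfl rfl) (cell_congr values rfl (by omega))
          (cell_congr values rfl (by omega)) (cell_congr values rfl (by omega)) he⟩))
    · exact Or.inr (Or.inr (Or.inr ⟨k, x - k, by omega, by omega, by omega,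
        E4_congr (cell_congr values rfl rfl) (cell_congr values rfl (by omega))
          (cell_congr values rfl (by omega)) (cell_congr values rfl (by omega)) he⟩))
    · exact Or.inr (Or.inr (Or.inr ⟨k + x, (values.getD 0 []).length - k - 1, by omega,
        by omega, by omega,
        E4_congr (cell_congr values rfl rfl) (cell_congr values (by omega) (by omega))
          (cell_congr values (by omega) (by omega)) (cell_congr values (by omega) (by omega)) he⟩))
  · rintro (⟨i, c, hi, hc, hw⟩ | ⟨r, c, hr, hc, he⟩ | ⟨r, c, hr, hc, he⟩ |
      ⟨r, c, hr, h3, hc, he⟩)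
    · exact Or.inl (Or.inl (Or.inl (Or.inl (Or.inl ⟨i, hi, c, hc, hw⟩))))
    · exact Or.inl (Or.inl (Or.inl (Or.inl (Or.inr ⟨c, hc, r, hr, he⟩))))
    · by_cases hcr : c ≤ r
      · exact Or.inl (Or.inl (Or.inl (Or.inr ⟨r - c, by omega, c, by omega,
          E4_congr (cell_congr values (by omega) rfl) (cell_congr values (by omega) rfl)
            (cell_congr values (by omega) rfl) (cell_congr values (by omega) rfl) he⟩)))
      · exact Or.inl (Or.inl (Or.inr ⟨c - r, ⟨by omega, by omega⟩, r, by omega,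
          E4_congr (cell_congr values rfl (by omega)) (cell_congr values rfl (by omega))
            (cell_congr values rfl (by omega)) (cell_congr values rfl (by omega)) he⟩))
    · by_cases hsum : r + c < (values.getD 0 []).length
      · exact Or.inl (Or.inr ⟨r + c, ⟨by omega, by omega⟩, r, by omega,
          E4_congr (cell_congr values rfl (by omega)) (cell_congr values rfl (by omega))
            (cell_congr values rfl (by omega)) (cell_congr values rfl (by omega)) he⟩)
      · exact Or.inr ⟨r + c - ((values.getD 0 []).length - 1), ⟨by omega, by omega⟩,
          (values.getD 0 []).length - 1 - c, by omega,
          E4_congr (cell_congr values (by omega) (by omega)) (cell_congr values (by omega) (by omega))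
            (cell_congr values (by omega) (by omega)) (cell_congr values (by omega) (by omega)) he⟩

-- ===== VERDICT (by name: the statement is the Claim_ definition above) =====
theorem isConsecutiveFour_spec : Claim_equal_isConsecutiveFour := by
  intro values _ _
  unfold Spec_isConsecutiveFour
  have h := (portA_iff values).trans (altB_iff values).symm
  revert h
  cases isConsecutiveFour values <;> cases isConsecutiveFour_alt values <;> simp
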